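-- pv_equiv track=rewrite | github.com/mervesudeboler/neural-soar | sensors/network_sensor.py | _categorize_signature
-- ===== SOURCE A (Python) =====
-- def _categorize_signature(signature: str) -> str:
--     """Categorize alert based on signature name."""
--     signature_lower = signature.lower()
--
--     if any(x in signature_lower for x in ["port scan", "port sweep", "nmap"]):
--         return "port_scan"
--     elif any(x in signature_lower for x in ["brute force", "ssh", "auth"]):
--         return "brute_force"
--     elif any(x in signature_lower for x in ["ddos", "flood", "syn", "udp"]):
--         return "ddos"
--     elif any(x in signature_lower for x in ["sql injection", "sql"]):
--         return "sql_injection"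
--     else:
--         return "normal"
-- ===== SOURCE B (Python) =====
-- # Flat keyword table + min-priority aggregation instead of an if/elif chain:
-- # scan all keywords once, keep the smallest matched priority, map it to a category.
-- KEYWORD_PRIORITY = [
--     ("port scan", 0), ("port sweep", 0), ("nmap", 0),
--     ("brute force", 1), ("ssh", 1), ("auth", 1),
--     ("ddos", 2), ("flood", 2), ("syn", 2), ("udp", 2),
--     ("sql injection", 3), ("sql", 3),
-- ]
-- CATEGORIES = ["port_scan", "brute_force", "ddos", "sql_injection"]
--
--
-- def _categorize_signature(signature: str) -> str:
--     """Categorize alert based on signature name."""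
--     s = signature.lower()
--     best = None
--     for kw, prio in KEYWORD_PRIORITY:
--         if kw in s and (best is None or prio < best):
--             best = prio
--     return "normal" if best is None else CATEGORIES[best]
-- ===== Notes on version B (the rewrite author's own statement) =====
-- stated objective: alternative
-- what changed: Replaces the prioritized if/elif early-return chain by a flat keyword->priority table scanned once in full, aggregating the minimum matched priority and mapping it to a category at the end.
import Mathlib
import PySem

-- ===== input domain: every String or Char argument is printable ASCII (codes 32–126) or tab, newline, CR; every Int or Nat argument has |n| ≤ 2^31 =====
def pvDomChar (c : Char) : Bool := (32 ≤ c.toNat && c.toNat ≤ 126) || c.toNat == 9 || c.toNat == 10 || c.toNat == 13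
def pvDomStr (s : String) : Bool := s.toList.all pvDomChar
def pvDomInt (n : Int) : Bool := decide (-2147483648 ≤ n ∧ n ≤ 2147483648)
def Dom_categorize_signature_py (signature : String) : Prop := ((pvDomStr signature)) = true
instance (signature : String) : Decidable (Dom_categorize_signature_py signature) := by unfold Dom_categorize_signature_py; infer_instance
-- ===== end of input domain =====

-- B replaces the prioritized if/elif chain by a full scan of a flat keyword->priority
-- table aggregating the minimum matched priority; return value only.

-- ===== PORT A =====
def categorize_signature_py (signature : String) : String :=
  let signature_lower := PySem.Str.lower signature
  if (["port scan", "port sweep", "nmap"].any (fun x => PySem.Str.isIn x signature_lower)) then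
    "port_scan"
  else if (["brute force", "ssh", "auth"].any (fun x => PySem.Str.isIn x signature_lower)) then
    "brute_force"
  else if (["ddos", "flood", "syn", "udp"].any (fun x => PySem.Str.isIn x signature_lower)) then
    "ddos"
  else if (["sql injection", "sql"].any (fun x => PySem.Str.isIn x signature_lower)) then
    "sql_injection"
  else
    "normal"

-- ===== PORT B =====
def pvKeywordPriority : List (String × Int) :=
  [("port scan", 0), ("port sweep", 0), ("nmap", 0),
   ("brute force", 1), ("ssh", 1), ("auth", 1),
   ("ddos", 2), ("flood", 2), ("syn", 2), ("udp", 2),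
   ("sql injection", 3), ("sql", 3)]

def pvCategories : List String := ["port_scan", "brute_force", "ddos", "sql_injection"]

-- one iteration of Source B's for-loop: 'if kw in s and (best is None or prio < best): best = prio'
def pvStep (s : String) (best : Option Int) (kp : String × Int) : Option Int :=
  match best with
  | none => if PySem.Str.isIn kp.1 s then some kp.2 else none
  | some b => if PySem.Str.isIn kp.1 s ∧ kp.2 < b then some kp.2 else some b

def categorize_signature_py_alt (signature : String) : String :=
  let s := PySem.Str.lower signature
  let best := pvKeywordPriority.foldl (pvStep s) none
  match best with
  | none => "normal"
  | some b => (PySem.List.pyGet? pvCategories b).getD ""  -- CATEGORIES[best]; best ∈ {0,1,2,3}, never out of range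

-- ===== PRECONDITION & SPEC =====
def Spec_categorize_signature_py (signature : String) (out : String) : Prop := out = categorize_signature_py_alt signature
instance (signature : String) (out : String) : Decidable (Spec_categorize_signature_py signature out) := by unfold Spec_categorize_signature_py; infer_instance

-- ===== CLAIM =====
def Claim_equal_categorize_signature_py : Prop := ∀ (signature : String), Dom_categorize_signature_py signature → Spec_categorize_signature_py signature (categorize_signature_py signature)

-- ===== LEMMAS AND PROOFS =====

-- keep-the-minimum update applied by pvStep when the keyword matches
def pvUpd (acc : Option Int) (p : Int) : Option Int :=
  match acc with
  | none => some p
  | some b => if p < b then some p else some b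

lemma pvStep_eq (s : String) (acc : Option Int) (k : String) (p : Int) :
    pvStep s acc (k, p) = if PySem.Str.isIn k s then pvUpd acc p else acc := by
  cases acc with
  | none => simp [pvStep, pvUpd]
  | some b =>
    simp only [pvStep, pvUpd]
    by_cases h : PySem.Str.isIn k s = true <;> by_cases h2 : p < b <;> simp [*]

lemma pvUpd_idem (acc : Option Int) (p : Int) : pvUpd (pvUpd acc p) p = pvUpd acc p := by
  cases acc with
  | none => simp [pvUpd]
  | some b => by_cases h : p < b <;> simp [pvUpd, h]

lemma foldGroup (s : String) (p : Int) (kws : List String) (acc : Option Int) :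
    (kws.map (fun k => (k, p))).foldl (pvStep s) acc =
      if kws.any (fun k => PySem.Str.isIn k s) then pvUpd acc p else acc := by
  induction kws generalizing acc with
  | nil => simp
  | cons k rest ih =>
    simp only [List.map_cons, List.foldl_cons, List.any_cons, pvStep_eq, ih]
    by_cases h : PySem.Str.isIn k s = true
    · simp only [h]; simp [pvUpd_idem]
    · simp only [Bool.not_eq_true] at h; simp only [h]; simp

-- ===== VERDICT =====
theorem categorize_signature_py_spec : Claim_equal_categorize_signature_py := by
  intro signature _
  unfold Spec_categorize_signature_py categorize_signature_py categorize_signature_py_alt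
  have hsplit : pvKeywordPriority =
      (["port scan", "port sweep", "nmap"].map (fun k => (k, (0 : Int)))) ++
      (["brute force", "ssh", "auth"].map (fun k => (k, (1 : Int)))) ++
      (["ddos", "flood", "syn", "udp"].map (fun k => (k, (2 : Int)))) ++
      (["sql injection", "sql"].map (fun k => (k, (3 : Int)))) := by rfl
  rw [hsplit]
  simp only [List.foldl_append, foldGroup]
  generalize PySem.Str.lower signature = sl
  generalize (["port scan", "port sweep", "nmap"].any (fun x => PySem.Str.isIn x sl)) = b0
  generalize (["brute force", "ssh", "auth"].any (fun x => PySem.Str.isIn x sl)) = b1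
  generalize (["ddos", "flood", "syn", "udp"].any (fun x => PySem.Str.isIn x sl)) = b2
  generalize (["sql injection", "sql"].any (fun x => PySem.Str.isIn x sl)) = b3
  cases b0 <;> cases b1 <;> cases b2 <;> cases b3 <;> rfl
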